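-- pv_equiv track=rewrite | github.com/Coin-233/tgbot | telegram/app.py | make_markdown_caption
-- ===== SOURCE A (Python) =====
-- def escape_markdown_v2(text: str) -> str:
--     text = text.replace("\\", "\\\\")
--     for ch in r"_*[]()~`>#+-=|{}.!":
--         text = text.replace(ch, "\\" + ch)
--     return text
--
-- def make_markdown_caption(display_url: str, text: str):
--     link_md = f"[{escape_markdown_v2(display_url)}]({display_url})"
--     if not text:
--         return link_md
--     body_md = escape_markdown_v2(text)
--     body_md_lines = "\n".join(
--         ["> " + line if line else ">" for line in body_md.splitlines()])
--     return f"{link_md}\n\n{body_md_lines}"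
-- ===== SOURCE B (Python) =====
-- _SPECIALS = frozenset("\\_*[]()~`>#+-=|{}.!")
--
--
-- def escape_markdown_v2(text: str) -> str:
--     # one character-level pass with an accumulator, instead of repeated
--     # full-string replace passes
--     out = []
--     for ch in text:
--         if ch in _SPECIALS:
--             out.append("\\")
--         out.append(ch)
--     return "".join(out)
--
--
-- def make_markdown_caption(display_url: str, text: str):
--     link_md = "[" + escape_markdown_v2(display_url) + "](" + display_url + ")"
--     if not text:
--         return link_md
--     # split the RAW text into lines first, then escape and quote each line
--     # (escaping never creates or removes line breaks, so this commutes)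
--     quoted = []
--     for line in text.splitlines():
--         quoted.append("> " + escape_markdown_v2(line) if line else ">")
--     return link_md + "\n\n" + "\n".join(quoted)
-- ===== Notes on version B (the rewrite author's own statement) =====
-- stated objective: alternative
-- what changed: escape_markdown_v2 becomes a single character-level accumulator pass over the string (append backslash when the char is in a frozenset) instead of 18 sequential full-string .replace passes, and the caption splits the RAW text into lines first and escapes/quotes each line, instead of escaping the whole text and splitting the escaped result.
import Mathlib
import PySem

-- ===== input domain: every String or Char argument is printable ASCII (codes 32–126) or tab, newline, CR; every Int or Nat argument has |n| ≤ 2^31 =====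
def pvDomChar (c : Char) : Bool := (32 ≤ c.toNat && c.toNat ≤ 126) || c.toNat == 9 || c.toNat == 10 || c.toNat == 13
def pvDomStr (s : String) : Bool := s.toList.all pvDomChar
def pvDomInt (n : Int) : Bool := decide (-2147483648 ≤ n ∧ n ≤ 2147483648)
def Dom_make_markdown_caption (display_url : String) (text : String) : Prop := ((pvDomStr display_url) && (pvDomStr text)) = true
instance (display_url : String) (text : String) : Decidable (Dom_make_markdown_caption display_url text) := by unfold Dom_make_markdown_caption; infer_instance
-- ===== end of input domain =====

-- B escapes in one character-level accumulator pass (not 18 replace passes) and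
-- splits the raw text into lines before escaping each line (alternative objective).

-- ===== PORT A =====
-- the characters of the raw string r"_*[]()~`>#+-=|{}.!" the Python loop iterates over
def pvSpecialsA : List Char := "_*[]()~`>#+-=|{}.!".toList

def escape_markdown_v2A (text : String) : String :=
  let text := PySem.Str.replace text "\\" "\\\\"
  pvSpecialsA.foldl
    (fun t ch => PySem.Str.replace t (String.ofList [ch]) (String.ofList ['\\', ch])) text

def make_markdown_caption (display_url : String) (text : String) : String :=
  let link_md := "[" ++ escape_markdown_v2A display_url ++ "](" ++ display_url ++ ")"
  if text = "" then link_md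
  else
    let body_md := escape_markdown_v2A text
    let body_md_lines := PySem.Str.join "\n"
      ((PySem.Str.splitlines body_md).map
        (fun line => if line ≠ "" then "> " ++ line else ">"))
    link_md ++ "\n\n" ++ body_md_lines

-- ===== PORT B =====
-- the frozenset of special characters of Source B
def pvSpecialsB : List Char :=
  ['\\', '_', '*', '[', ']', '(', ')', '~', '`', '>', '#', '+', '-', '=', '|', '{', '}', '.', '!']

-- one character-level pass: append '\' before each special character
def escape_markdown_v2B (text : String) : String :=
  String.ofList (text.toList.foldl
    (fun out ch => (if ch ∈ pvSpecialsB then out ++ ['\\'] else out) ++ [ch]) [])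

def make_markdown_caption_alt (display_url : String) (text : String) : String :=
  let link_md := "[" ++ escape_markdown_v2B display_url ++ "](" ++ display_url ++ ")"
  if text = "" then link_md
  else
    let quoted := (PySem.Str.splitlines text).map
      (fun line => if line ≠ "" then "> " ++ escape_markdown_v2B line else ">")
    link_md ++ "\n\n" ++ PySem.Str.join "\n" quoted

-- ===== PRECONDITION & SPEC =====
def Spec_make_markdown_caption (display_url : String) (text : String) (out : String) : Prop := out = make_markdown_caption_alt display_url text
instance (display_url : String) (text : String) (out : String) : Decidable (Spec_make_markdown_caption display_url text out) := by unfold Spec_make_markdown_caption; infer_instance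

-- ===== CLAIM =====
def Claim_equal_make_markdown_caption : Prop := ∀ (display_url : String) (text : String), Dom_make_markdown_caption display_url text → Spec_make_markdown_caption display_url text (make_markdown_caption display_url text)

-- ===== LEMMAS AND PROOFS =====

-- per-character escaping function
def pvEsc (c : Char) : List Char := if c ∈ pvSpecialsB then ['\\', c] else [c]

-- escaping function after the chars of `done` (besides '\') have been replaced
def pvG (done : List Char) (x : Char) : List Char :=
  if x = '\\' then ['\\', '\\'] else if x ∈ done then ['\\', x] else [x]

theorem replace_go_single (c : Char) (new : List Char) :
    ∀ (fuel : Nat) (l acc : List Char), l.length ≤ fuel →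
      PySem.Chars.replace.go [c] new fuel l acc
        = acc.reverse ++ l.flatMap (fun x => if x = c then new else [x]) := by
  intro fuel
  induction fuel with
  | zero =>
    intro l acc h
    have : l = [] := List.eq_nil_of_length_eq_zero (Nat.le_zero.mp h)
    subst this; simp [PySem.Chars.replace.go]
  | succ n ih =>
    intro l acc h
    cases l with
    | nil => simp [PySem.Chars.replace.go]
    | cons x t =>
      by_cases hx : x = c
      · subst hx
        have hpre : List.isPrefixOf [x] (x :: t) = true := by
          simp [List.isPrefixOf]
        rw [PySem.Chars.replace.go]
        simp only [hpre, if_pos]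
        simp only [List.length_cons] at h
        rw [ih _ _ (by simpa using Nat.le_of_succ_le_succ h)]
        simp
      · have hpre : List.isPrefixOf [c] (x :: t) = false := by
          simp only [List.isPrefixOf, Bool.and_eq_false_iff, beq_eq_false_iff_ne, ne_eq]
          exact Or.inl (fun hh => hx hh.symm)
        rw [PySem.Chars.replace.go]
        simp only [hpre]
        simp only [List.length_cons] at h
        rw [ih _ _ (Nat.le_of_succ_le_succ h)]
        simp [hx]

theorem replace_single (c : Char) (new l : List Char) :
    PySem.Chars.replace l [c] new = l.flatMap (fun x => if x = c then new else [x]) := by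
  rw [PySem.Chars.replace, if_neg (by simp)]
  exact replace_go_single c new l.length l [] (le_refl _)

theorem fold_replace_eq (l : List Char) :
    ∀ (cs done : List Char), '\\' ∉ cs → (done ++ cs).Nodup →
      cs.foldl (fun t ch => PySem.Str.replace t (String.ofList [ch]) (String.ofList ['\\', ch]))
          (String.ofList (l.flatMap (pvG done)))
        = String.ofList (l.flatMap (pvG (done ++ cs))) := by
  intro cs
  induction cs with
  | nil => intro done _ _; simp
  | cons c cs ih =>
    intro done hb hnd
    have hcb : c ≠ '\\' := fun h => hb (h ▸ List.mem_cons_self ..)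
    have hcd : c ∉ done := by
      intro h
      obtain ⟨-, -, hdisj⟩ := List.pairwise_append.mp hnd
      exact hdisj c h c (List.mem_cons_self ..) rfl
    simp only [List.foldl_cons]
    have hstep : PySem.Str.replace (String.ofList (l.flatMap (pvG done)))
        (String.ofList [c]) (String.ofList ['\\', c])
        = String.ofList (l.flatMap (pvG (done ++ [c]))) := by
      rw [PySem.Str.replace]
      simp only [String.toList_ofList]
      rw [replace_single]
      congr 1
      rw [List.flatMap_assoc]
      apply List.flatMap_congr
      intro x _
      by_cases hxb : x = '\\'
      · subst hxb; simp [pvG, hcb.symm]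
      · by_cases hxd : x ∈ done
        · have hxc : x ≠ c := fun h => hcd (h ▸ hxd)
          simp [pvG, hxb, hxd, hxc, hcb.symm]
        · by_cases hxc : x = c
          · subst hxc; simp [pvG, hxb, hxd]
          · simp [pvG, hxb, hxd, hxc, List.mem_append]
    rw [hstep, ih (done ++ [c]) (fun h => hb (List.mem_cons_of_mem _ h))
      (by simpa using hnd)]
    simp

-- A's chained replaces compute the per-character escape in one flatMap
theorem escA_eq_flatMap (text : String) :
    escape_markdown_v2A text = String.ofList (text.toList.flatMap pvEsc) := by
  rw [escape_markdown_v2A]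
  have h1 : PySem.Str.replace text "\\" "\\\\" = String.ofList (text.toList.flatMap (pvG [])) := by
    rw [PySem.Str.replace]
    have h0 : ("\\" : String).toList = ['\\'] := by decide
    have h2 : ("\\\\" : String).toList = ['\\', '\\'] := by decide
    rw [h0, h2, replace_single]
    exact congrArg _ (List.flatMap_congr (fun x _ => by simp [pvG]))
  rw [h1, fold_replace_eq _ pvSpecialsA [] (by decide) (by simp; decide)]
  congr 1
  apply List.flatMap_congr
  intro x _
  by_cases hxb : x = '\\'
  · subst hxb; simp [pvG, pvEsc]; decide
  · by_cases hxs : x ∈ pvSpecialsA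
    · have : x ∈ pvSpecialsB := by
        have he : pvSpecialsB = '\\' :: pvSpecialsA := by decide
        rw [he]; exact List.mem_cons_of_mem _ hxs
      simp [pvG, pvEsc, hxb, hxs, this]
    · have : x ∉ pvSpecialsB := by
        have he : pvSpecialsB = '\\' :: pvSpecialsA := by decide
        rw [he]; simp [hxb, hxs]
      simp [pvG, pvEsc, hxb, hxs, this]

-- B's accumulator loop computes the same flatMap
theorem escB_eq_flatMap (text : String) :
    escape_markdown_v2B text = String.ofList (text.toList.flatMap pvEsc) := by
  rw [escape_markdown_v2B]
  congr 1
  have h : ∀ (l acc : List Char),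
      l.foldl (fun out ch => (if ch ∈ pvSpecialsB then out ++ ['\\'] else out) ++ [ch]) acc
        = acc ++ l.flatMap pvEsc := by
    intro l
    induction l with
    | nil => intro acc; simp
    | cons c t ih =>
      intro acc
      by_cases hc : c ∈ pvSpecialsB
      · simp [hc, ih, pvEsc]
      · simp [hc, ih, pvEsc]
  simpa using h text.toList []

-- escaping an empty list is empty, a nonempty list stays nonempty
theorem pvEsc_ne_nil (c : Char) : pvEsc c ≠ [] := by
  unfold pvEsc; split <;> simp

-- the head of an escaped nonempty list is never a line-break character of the raw head
theorem head?_flatMap_esc (d : Char) (t : List Char) (hd : d ≠ '\n') :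
    ((d :: t).flatMap pvEsc).head? ≠ some '\n' := by
  by_cases h : d ∈ pvSpecialsB
  · simp [pvEsc, h]
  · simp [pvEsc, h, hd]

-- reduction lemmas for splitlines.go
theorem go_nil (isB : Char → Bool) (cur : List Char) (acc : List (List Char)) :
    PySem.Chars.splitlines.go isB [] cur acc
      = if cur.isEmpty then acc.reverse else (cur.reverse :: acc).reverse := by
  rfl

theorem go_crlf (isB : Char → Bool) (rest cur : List Char) (acc : List (List Char)) :
    PySem.Chars.splitlines.go isB ('\r' :: '\n' :: rest) cur acc
      = PySem.Chars.splitlines.go isB rest [] (cur.reverse :: acc) := by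
  rfl

theorem go_cons (isB : Char → Bool) (c : Char) (rest cur : List Char) (acc : List (List Char))
    (hc : c ≠ '\r') :
    PySem.Chars.splitlines.go isB (c :: rest) cur acc
      = if isB c then PySem.Chars.splitlines.go isB rest [] (cur.reverse :: acc)
        else PySem.Chars.splitlines.go isB rest (c :: cur) acc :=
  PySem.Chars.splitlines.go.eq_3 isB cur acc c rest (fun _ h1 _ => absurd h1 hc)

theorem go_cr (isB : Char → Bool) (rest cur : List Char) (acc : List (List Char))
    (h : rest.head? ≠ some '\n') :
    PySem.Chars.splitlines.go isB ('\r' :: rest) cur acc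
      = if isB '\r' then PySem.Chars.splitlines.go isB rest [] (cur.reverse :: acc)
        else PySem.Chars.splitlines.go isB rest ('\r' :: cur) acc :=
  PySem.Chars.splitlines.go.eq_3 isB cur acc '\r' rest
    (fun _ _ h2 => h (by rw [h2]; rfl))

-- splitlines commutes with per-character escaping (no break character is special
-- and the inserted '\' is not a break character)
theorem go_flatMap (isB : Char → Bool) (hb : isB '\\' = false)
    (ht : ∀ c ∈ pvSpecialsB, isB c = false) :
    ∀ (n : Nat) (l p : List Char) (acc : List (List Char)), l.length ≤ n →
      PySem.Chars.splitlines.go isB (l.flatMap pvEsc) ((p.flatMap pvEsc).reverse)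
          (acc.map (fun ln => ln.flatMap pvEsc))
        = (PySem.Chars.splitlines.go isB l p.reverse acc).map (fun ln => ln.flatMap pvEsc) := by
  intro n
  induction n with
  | zero =>
    intro l p acc h
    have : l = [] := List.eq_nil_of_length_eq_zero (Nat.le_zero.mp h)
    subst this
    simp only [List.flatMap_nil, go_nil]
    cases p with
    | nil => simp
    | cons c t =>
      simp
      exact fun _ => pvEsc_ne_nil c
  | succ n ih =>
    intro l p acc h
    cases l with
    | nil => exact ih [] p acc (by simp)
    | cons c rest =>
      simp only [List.length_cons] at h
      by_cases hcr : c = '\r'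
      · subst hcr
        cases rest with
        | nil =>
          have hmem : '\r' ∉ pvSpecialsB := by decide
          simp only [List.flatMap_cons, List.flatMap_nil, pvEsc, if_neg hmem, List.append_nil]
          rw [go_cr isB [] _ _ (by simp), go_cr isB [] _ _ (by simp)]
          by_cases hB : isB '\r' = true
          · rw [if_pos hB, if_pos hB]
            have := ih [] [] (p :: acc) (by simp)
            simpa using this
          · rw [if_neg hB, if_neg hB]
            have := ih [] (p ++ ['\r']) acc (by simp)
            simp only [List.flatMap_nil] at this ⊢
            rw [go_nil, go_nil] at *
            have heq : ((p ++ ['\r']).flatMap pvEsc).reverse = '\r' :: (p.flatMap pvEsc).reverse := by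
              simp [pvEsc, hmem]
            rw [← heq]
            have heq2 : ('\r' :: p.reverse) = (p ++ ['\r']).reverse := by simp
            rw [heq2]
            exact this
        | cons d rest' =>
          by_cases hdn : d = '\n'
          · subst hdn
            have hr : '\r' ∉ pvSpecialsB := by decide
            have hn : '\n' ∉ pvSpecialsB := by decide
            simp only [List.flatMap_cons, pvEsc, if_neg hr, if_neg hn]
            simp only [List.cons_append, List.nil_append]
            rw [go_crlf, go_crlf]
            have := ih rest' [] (p :: acc) (by simp only [List.length_cons] at h; omega)
            simpa using this
          · have hr : '\r' ∉ pvSpecialsB := by decide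
            have hhead : ((d :: rest').flatMap pvEsc).head? ≠ some '\n' :=
              head?_flatMap_esc d rest' hdn
            have hshape : ('\r' :: d :: rest').flatMap pvEsc
                = '\r' :: (d :: rest').flatMap pvEsc := by
              simp [pvEsc, hr]
            rw [hshape, go_cr isB _ _ _ hhead, go_cr isB _ _ _ (by simpa using hdn)]
            by_cases hB : isB '\r' = true
            · rw [if_pos hB, if_pos hB]
              have := ih (d :: rest') [] (p :: acc) (by simp only [List.length_cons] at h ⊢; omega)
              simpa using this
            · rw [if_neg hB, if_neg hB]
              have := ih (d :: rest') (p ++ ['\r']) acc (by simp only [List.length_cons] at h ⊢; omega)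
              have heq : ((p ++ ['\r']).flatMap pvEsc).reverse = '\r' :: (p.flatMap pvEsc).reverse := by
                simp [pvEsc, hr]
              rw [heq] at this
              have heq2 : (p ++ ['\r']).reverse = '\r' :: p.reverse := by simp
              rw [heq2] at this
              exact this
      · by_cases hmem : c ∈ pvSpecialsB
        · have hcB : isB c = false := ht c hmem
          have hcn : c ≠ '\r' := hcr
          have hbslash : ('\\' : Char) ≠ '\r' := by decide
          have hshape : (c :: rest).flatMap pvEsc = '\\' :: c :: rest.flatMap pvEsc := by
            simp [pvEsc, hmem]
          rw [hshape, go_cons isB '\\' _ _ _ hbslash, if_neg (by simp [hb]),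
            go_cons isB c _ _ _ hcn, if_neg (by simp [hcB]),
            go_cons isB c _ _ _ hcn, if_neg (by simp [hcB])]
          have := ih rest (p ++ [c]) acc (by omega)
          have heq : ((p ++ [c]).flatMap pvEsc).reverse = c :: '\\' :: (p.flatMap pvEsc).reverse := by
            simp [pvEsc, hmem]
          rw [heq] at this
          have heq2 : (p ++ [c]).reverse = c :: p.reverse := by simp
          rw [heq2] at this
          exact this
        · have hshape : (c :: rest).flatMap pvEsc = c :: rest.flatMap pvEsc := by
            simp [pvEsc, hmem]
          rw [hshape, go_cons isB c _ _ _ hcr, go_cons isB c _ _ _ hcr]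
          by_cases hB : isB c = true
          · rw [if_pos hB, if_pos hB]
            have := ih rest [] (p :: acc) (by omega)
            simpa using this
          · rw [if_neg hB, if_neg hB]
            have := ih rest (p ++ [c]) acc (by omega)
            have heq : ((p ++ [c]).flatMap pvEsc).reverse = c :: (p.flatMap pvEsc).reverse := by
              simp [pvEsc, hmem]
            rw [heq] at this
            have heq2 : (p ++ [c]).reverse = c :: p.reverse := by simp
            rw [heq2] at this
            exact this

-- the break-character predicate of PySem.Chars.splitlines
def pvIsB (c : Char) : Bool :=
  c.toNat = 10 || c.toNat = 13 || c.toNat = 11 || c.toNat = 12 || c.toNat = 28 ||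
    c.toNat = 29 || c.toNat = 30 || c.toNat = 133 || c.toNat = 8232 || c.toNat = 8233

theorem splitlines_eq_go (l : List Char) :
    PySem.Chars.splitlines l = PySem.Chars.splitlines.go pvIsB l [] [] := rfl

theorem splitlines_flatMap (l : List Char) :
    PySem.Chars.splitlines (l.flatMap pvEsc)
      = (PySem.Chars.splitlines l).map (fun ln => ln.flatMap pvEsc) := by
  rw [splitlines_eq_go, splitlines_eq_go]
  exact go_flatMap pvIsB (by decide) (by intro c hc; fin_cases hc <;> rfl) l.length l [] [] (le_refl _)

-- the per-line bodies agree
theorem body_eq (text : String) :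
    PySem.Str.join "\n"
        ((PySem.Str.splitlines (escape_markdown_v2A text)).map
          (fun line => if line ≠ "" then "> " ++ line else ">"))
      = PySem.Str.join "\n"
        ((PySem.Str.splitlines text).map
          (fun line => if line ≠ "" then "> " ++ escape_markdown_v2B line else ">")) := by
  rw [escA_eq_flatMap]
  rw [PySem.Str.splitlines, PySem.Str.splitlines]
  simp only [String.toList_ofList]
  rw [splitlines_flatMap]
  congr 1
  simp only [List.map_map]
  apply List.map_congr_left
  intro ln _
  simp only [Function.comp]
  by_cases hln : ln = []
  · subst hln; simp
  · have h1 : String.ofList (ln.flatMap pvEsc) ≠ "" := by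
      cases ln with
      | nil => exact absurd rfl hln
      | cons c t =>
        intro hcontra
        have h4 := congrArg String.toList hcontra
        have h3 : pvEsc c ++ List.flatMap pvEsc t = [] := by
          simpa [show ("" : String).toList = [] from rfl] using h4
        exact pvEsc_ne_nil c (List.append_eq_nil_iff.mp h3).1
    have h2 : String.ofList ln ≠ "" := by
      intro h
      have : (String.ofList ln).toList = ("" : String).toList := by rw [h]
      simp at this
      exact hln this
    rw [if_pos h1, if_pos h2]
    rw [escB_eq_flatMap]
    congr 1
    simp

-- ===== VERDICT =====
theorem make_markdown_caption_spec : Claim_equal_make_markdown_caption := by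
  intro display_url text _
  unfold Spec_make_markdown_caption make_markdown_caption make_markdown_caption_alt
  simp only
  by_cases ht : text = ""
  · simp [ht, escA_eq_flatMap, escB_eq_flatMap]
  · rw [if_neg ht, if_neg ht, escA_eq_flatMap, escB_eq_flatMap, body_eq]
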